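-- pv_equiv track=rewrite | github.com/vasivandrij656-arch/atlastrinity | src/brain/healing/parallel_healing.py | _extract_fix_description
-- ===== SOURCE A (Python) =====
-- def _extract_fix_description(analysis: str) -> str:
--     """Extract a concise fix description from Vibe analysis."""
--     if not analysis:
--         return "Unknown fix"
--
--     # Look for common patterns
--     lines = analysis.split("\n")
--     for line in lines:
--         lower = line.lower()
--         if any(kw in lower for kw in ["fix:", "solution:", "the fix", "to fix"]):
--             return line.strip()[:200]  # pyre-ignore
--
--     # Return first meaningful line
--     for line in lines:
--         if len(line.strip()) > 20:
--             return line.strip()[:200]  # pyre-ignore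
--
--     return analysis[:200]  # pyre-ignore
-- ===== SOURCE B (Python) =====
-- def _extract_fix_description(analysis: str) -> str:
--     """Extract a concise fix description from Vibe analysis (single pass)."""
--     if not analysis:
--         return "Unknown fix"
--
--     first_meaningful = None
--     for line in analysis.split("\n"):
--         lower = line.lower()
--         if "fix:" in lower or "solution:" in lower or "the fix" in lower or "to fix" in lower:
--             return line.strip()[:200]
--         stripped = line.strip()
--         if first_meaningful is None and len(stripped) > 20:
--             first_meaningful = stripped[:200]
--
--     return first_meaningful if first_meaningful is not None else analysis[:200]
-- ===== Notes on version B (the rewrite author's own statement) =====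
-- stated objective: simpler
-- what changed: A's two separate scans over the split lines (keyword pass, then first-meaningful pass) are merged into one loop that records the first meaningful line in an accumulator while still letting any later keyword line win.
import Mathlib
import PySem

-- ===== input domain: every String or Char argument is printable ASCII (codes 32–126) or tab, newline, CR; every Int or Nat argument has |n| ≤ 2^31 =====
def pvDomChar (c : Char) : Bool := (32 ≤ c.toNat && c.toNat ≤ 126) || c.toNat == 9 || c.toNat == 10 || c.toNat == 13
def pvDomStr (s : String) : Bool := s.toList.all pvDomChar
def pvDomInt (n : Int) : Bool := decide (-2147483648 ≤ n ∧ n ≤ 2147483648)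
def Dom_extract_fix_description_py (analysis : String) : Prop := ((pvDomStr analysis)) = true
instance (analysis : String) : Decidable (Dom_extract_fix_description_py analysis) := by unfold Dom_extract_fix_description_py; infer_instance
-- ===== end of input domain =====

-- B replaces A's two scans over the lines with one pass that records the first meaningful
-- line in an accumulator while still letting a later keyword line win (objective: simpler).

-- ===== PORT A =====
-- first loop of A: first line containing a keyword, already stripped and truncated
def pvA_loop1 : List String → Option String
  | [] => none
  | line :: rest =>
    if (["fix:", "solution:", "the fix", "to fix"].any
        (fun kw => PySem.Str.isIn kw (PySem.Str.lower line)))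
    then some (PySem.Str.slice (PySem.Str.strip line) none (some 200))
    else pvA_loop1 rest

-- second loop of A: first line whose stripped length exceeds 20
def pvA_loop2 : List String → Option String
  | [] => none
  | line :: rest =>
    if 20 < PySem.Str.len (PySem.Str.strip line)
    then some (PySem.Str.slice (PySem.Str.strip line) none (some 200))
    else pvA_loop2 rest

def extract_fix_description_py (analysis : String) : String :=
  if analysis = "" then "Unknown fix"
  else
    let lines := (PySem.Str.split? analysis "\n").getD []
    match pvA_loop1 lines with
    | some s => s
    | none =>
      match pvA_loop2 lines with
      | some s => s
      | none => PySem.Str.slice analysis none (some 200)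

-- ===== PORT B =====
-- B's single loop: fm is the `first_meaningful` variable, fallback is analysis[:200]
def pvB_loop (fallback : String) : List String → Option String → String
  | [], fm => fm.getD fallback
  | line :: rest, fm =>
    let lower := PySem.Str.lower line
    if PySem.Str.isIn "fix:" lower || PySem.Str.isIn "solution:" lower
        || PySem.Str.isIn "the fix" lower || PySem.Str.isIn "to fix" lower
    then PySem.Str.slice (PySem.Str.strip line) none (some 200)
    else
      let stripped := PySem.Str.strip line
      pvB_loop fallback rest
        (if fm = none ∧ 20 < PySem.Str.len stripped
         then some (PySem.Str.slice stripped none (some 200)) else fm)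

def extract_fix_description_py_alt (analysis : String) : String :=
  if analysis = "" then "Unknown fix"
  else pvB_loop (PySem.Str.slice analysis none (some 200))
        ((PySem.Str.split? analysis "\n").getD []) none

-- ===== PRECONDITION & SPEC =====
def Spec_extract_fix_description_py (analysis : String) (out : String) : Prop := out = extract_fix_description_py_alt analysis
instance (analysis : String) (out : String) : Decidable (Spec_extract_fix_description_py analysis out) := by unfold Spec_extract_fix_description_py; infer_instance

-- ===== CLAIM (what is proved, stated in full; the proofs are below) =====
def Claim_equal_extract_fix_description_py : Prop := ∀ (analysis : String), Dom_extract_fix_description_py analysis → Spec_extract_fix_description_py analysis (extract_fix_description_py analysis)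

-- ===== LEMMAS AND PROOFS =====

-- B's single pass computes A's two-pass result, for any state of the accumulator
theorem pvB_loop_eq (fallback : String) (lines : List String) (fm : Option String) :
    pvB_loop fallback lines fm =
      match pvA_loop1 lines with
      | some s => s
      | none =>
        match fm with
        | some m => m
        | none => (pvA_loop2 lines).getD fallback := by
  induction lines generalizing fm with
  | nil => cases fm <;> simp [pvB_loop, pvA_loop1, pvA_loop2]
  | cons line rest ih =>
    simp only [pvB_loop, pvA_loop1, pvA_loop2, List.any_cons, List.any_nil,
      Bool.or_false, Bool.or_assoc]
    split_ifs
    all_goals try rfl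
    all_goals rw [ih]
    all_goals rcases fm with _ | m
    all_goals cases hl1 : pvA_loop1 rest
    all_goals try simp_all
    all_goals omega

-- ===== VERDICT (by name: the statement is the Claim_ definition above) =====
theorem extract_fix_description_py_spec : Claim_equal_extract_fix_description_py := by
  intro analysis _
  unfold Spec_extract_fix_description_py extract_fix_description_py extract_fix_description_py_alt
  by_cases h : analysis = ""
  · simp [h]
  · rw [if_neg h, if_neg h, pvB_loop_eq]
    cases hl1 : pvA_loop1 ((PySem.Str.split? analysis "\n").getD []) <;>
      cases hl2 : pvA_loop2 ((PySem.Str.split? analysis "\n").getD []) <;>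
      simp [hl1, hl2]
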